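-- pv_equiv track=rewrite | github.com/tugotpwnd/PyRevMate | models/increment_revision_model.py | find_latest_revision_value_and_index
-- ===== SOURCE A (Python) =====
-- def find_latest_revision_value_and_index(table_data):
--     """
--     Determine the value of the highest REV {i} REV field with data and its index.
--
--     Parameters:
--     - table_data: A list of dictionaries containing table data.
--
--     Returns:
--     - A tuple (latest_revision_value, latest_revision_index), or (None, None) if no REV fields have data.
--     """
--
--
--     revision_fields = get_revision_fields()
--
--     latest_revision_value = None
--     latest_revision_index = None
--     max_revisions = find_max_revisions(table_data)
--     for i in range(1, max_revisions + 1):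
--
--         # Check if any field for this revision index has data
--         has_data = any(
--             field.get("Assignment") == template.format(i=i) and field.get("Value")
--             for field in table_data
--             for template in revision_fields
--         )
--
--         if not has_data:
--             break  # Stop checking once we find a revision with no data
--
--         # Find the specific "REV {i} REV" field value
--         rev_field = next(
--             (
--                 field.get("Value") for field in table_data
--                 if field.get("Assignment") == f"REV {i} REV" and field.get("Value")
--             ),
--             None
--         )
--
--         if rev_field:
--             latest_revision_value = rev_field
--             latest_revision_index = i
--
--     return latest_revision_value, latest_revision_index
--
-- def find_max_revisions(table_data):
--     # Determine the highest revision index (i) present in the table data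
--     max_revisions = 0
--     for field in table_data:
--         assignment = field.get("Assignment", "")
--         if assignment.startswith("REV ") and "REV" in assignment:
--             try:
--                 index = int(assignment.split(" ")[1])
--                 max_revisions = max(max_revisions, index)
--             except ValueError:
--                 continue
--     return max_revisions
--
-- def get_revision_fields():
--     """
--     Returns the list of revision field templates.
--     """
--     return [
--         "REV {i} REV", "REV {i} DATE", "REV {i} DESC", "REV {i} DESIGNER",
--         "REV {i} DRAFTED", "REV {i} CHECKED", "REV {i} RPEQ",
--         "REV {i} RPEQSIGN", "REV {i} COMPANY"
--     ]
-- ===== SOURCE B (Python) =====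
-- def find_latest_revision_value_and_index(table_data):
--     """
--     Determine the value of the highest REV {i} REV field with data and its index.
--     Single bound computation, contiguous-prefix walk, then one backward scan.
--     """
--     suffixes = ["REV", "DATE", "DESC", "DESIGNER", "DRAFTED", "CHECKED",
--                 "RPEQ", "RPEQSIGN", "COMPANY"]
--
--     def has_rev_data(i):
--         return any(
--             f.get("Assignment") == f"REV {i} {suf}" and f.get("Value")
--             for suf in suffixes
--             for f in table_data
--         )
--
--     # upper bound on revision indices named anywhere in the table
--     cands = []
--     for f in table_data:
--         a = f.get("Assignment", "")
--         if a.startswith("REV "):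
--             try:
--                 cands.append(int(a.split(" ")[1]))
--             except ValueError:
--                 pass
--     limit = max(cands, default=0)
--
--     # n = length of the contiguous populated prefix 1..n
--     n = 0
--     while n < limit and has_rev_data(n + 1):
--         n += 1
--
--     # highest i <= n whose "REV i REV" field is populated
--     for i in range(n, 0, -1):
--         for f in table_data:
--             if f.get("Assignment") == f"REV {i} REV":
--                 v = f.get("Value")
--                 if v:
--                     return v, i
--     return None, None
-- ===== Notes on version B (the rewrite author's own statement) =====
-- stated objective: simpler
-- what changed: A's break-loop with latest_value/latest_index state, its per-index next() rescan and the find_max_revisions helper are replaced by one candidate-list comprehension with max(default=0) for the bound, a contiguous-prefix while-walk, and a single backward scan that returns the first populated 'REV i REV' value.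
import Mathlib
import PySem

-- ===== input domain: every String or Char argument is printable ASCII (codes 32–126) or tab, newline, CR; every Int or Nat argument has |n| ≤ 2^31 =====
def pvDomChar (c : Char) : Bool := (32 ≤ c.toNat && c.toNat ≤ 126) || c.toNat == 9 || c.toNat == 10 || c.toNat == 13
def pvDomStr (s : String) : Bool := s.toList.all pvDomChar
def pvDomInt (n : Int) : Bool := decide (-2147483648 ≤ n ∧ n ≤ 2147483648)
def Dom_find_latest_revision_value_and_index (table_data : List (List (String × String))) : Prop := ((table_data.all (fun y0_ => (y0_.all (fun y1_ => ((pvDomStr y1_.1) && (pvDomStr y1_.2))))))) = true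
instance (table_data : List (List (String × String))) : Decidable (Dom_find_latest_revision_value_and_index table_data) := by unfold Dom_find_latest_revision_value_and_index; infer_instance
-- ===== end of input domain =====

-- B restructures A: the break-loop with `latest_*` state, the per-index `next()` rescan and the
-- find_max_revisions helper become one bound computation (comprehension + max(default)), a
-- contiguous-prefix walk and a single backward early-return scan (objective: simpler; not faster).

-- shared transliterations of Python built-ins used by both sources
-- field.get(k) on a dict passed in as an association list (first match wins)
def pvGet (field : List (String × String)) (k : String) : Option String :=
  (PySem.Dict.mk field).get? k

-- Python truthiness of an Optional[str]: None and "" are falsy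
def pvTruthy : Option String → Bool
  | some s => !(s == "")
  | none => false

-- ===== PORT A =====

-- get_revision_fields: each template "REV {i} X" under .format(i=i) denotes this concatenation
def pvRevisionFields : List (Int → String) :=
  [fun i => "REV " ++ PySem.Int.toStr i ++ " REV",
   fun i => "REV " ++ PySem.Int.toStr i ++ " DATE",
   fun i => "REV " ++ PySem.Int.toStr i ++ " DESC",
   fun i => "REV " ++ PySem.Int.toStr i ++ " DESIGNER",
   fun i => "REV " ++ PySem.Int.toStr i ++ " DRAFTED",
   fun i => "REV " ++ PySem.Int.toStr i ++ " CHECKED",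
   fun i => "REV " ++ PySem.Int.toStr i ++ " RPEQ",
   fun i => "REV " ++ PySem.Int.toStr i ++ " RPEQSIGN",
   fun i => "REV " ++ PySem.Int.toStr i ++ " COMPANY"]

-- find_max_revisions; assignment.split(" ")[1] cannot raise (a string starting with "REV "
-- always splits into ≥ 2 pieces), so the .getD "" default is never the result Python lacks
def find_max_revisions (table_data : List (List (String × String))) : Int :=
  table_data.foldl (fun maxRev field =>
    let assignment := (pvGet field "Assignment").getD ""
    if PySem.Str.startswith assignment "REV " && PySem.Str.isIn "REV" assignment then
      match PySem.Int.ofStr?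
          ((PySem.List.pyGet? ((PySem.Str.split? assignment " ").getD []) 1).getD "") with
      | some index => max maxRev index
      | none => maxRev          -- except ValueError: continue
    else maxRev) 0

-- the `any(...)` over fields × templates
def pvHasData (table_data : List (List (String × String))) (i : Int) : Bool :=
  table_data.any (fun field => pvRevisionFields.any (fun template =>
    (pvGet field "Assignment" == some (template i)) && pvTruthy (pvGet field "Value")))

-- next((field.get("Value") for field in table_data if ...), None)
def pvRevField (table_data : List (List (String × String))) (i : Int) : Option String :=
  (table_data.find? (fun field =>
      (pvGet field "Assignment" == some ("REV " ++ PySem.Int.toStr i ++ " REV")) &&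
      pvTruthy (pvGet field "Value"))).bind (fun field => pvGet field "Value")

-- the for-loop over range(1, max_revisions + 1) with its break and latest_* state
def pvLoopA (table_data : List (List (String × String))) :
    List Int → Option String × Option Int → Option String × Option Int
  | [], st => st
  | i :: rest, st =>
    if !pvHasData table_data i then st          -- break
    else
      let revField := pvRevField table_data i
      if pvTruthy revField then pvLoopA table_data rest (revField, some i)
      else pvLoopA table_data rest st

def find_latest_revision_value_and_index (table_data : List (List (String × String))) :
    Option String × Option Int :=
  pvLoopA table_data
    (PySem.List.pyRange 1 (find_max_revisions table_data + 1) 1) (none, none)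

-- ===== PORT B =====

def pvSuffixes : List String :=
  ["REV", "DATE", "DESC", "DESIGNER", "DRAFTED", "CHECKED", "RPEQ", "RPEQSIGN", "COMPANY"]

-- has_rev_data(i): any(...) over suffixes × fields
def pvHasRevData (table_data : List (List (String × String))) (i : Int) : Bool :=
  pvSuffixes.any (fun suf => table_data.any (fun f =>
    (pvGet f "Assignment" == some ("REV " ++ PySem.Int.toStr i ++ " " ++ suf)) &&
    pvTruthy (pvGet f "Value")))

-- the cands-building loop; a.split(" ")[1] cannot raise, as in port A
def pvCands (table_data : List (List (String × String))) : List Int :=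
  table_data.foldl (fun cands f =>
    let a := (pvGet f "Assignment").getD ""
    if PySem.Str.startswith a "REV " then
      match PySem.Int.ofStr?
          ((PySem.List.pyGet? ((PySem.Str.split? a " ").getD []) 1).getD "") with
      | some v => cands ++ [v]
      | none => cands           -- except ValueError: pass
    else cands) []

-- while n < limit and has_rev_data(n + 1): n += 1   (fuel = limit - n, so fuel 0 ↔ n ≥ limit)
def pvWalk (table_data : List (List (String × String))) : Nat → Int → Int
  | 0, n => n
  | fuel + 1, n => if pvHasRevData table_data (n + 1) then pvWalk table_data fuel (n + 1) else n

-- the inner `for f in table_data` with its early return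
def pvFindRevB (i : Int) : List (List (String × String)) → Option String
  | [] => none
  | f :: fs =>
    if pvGet f "Assignment" == some ("REV " ++ PySem.Int.toStr i ++ " REV") then
      let v := pvGet f "Value"
      if pvTruthy v then v else pvFindRevB i fs
    else pvFindRevB i fs

-- the outer `for i in range(n, 0, -1)` with its early return
def pvScanB (table_data : List (List (String × String))) : List Int → Option String × Option Int
  | [] => (none, none)
  | i :: rest =>
    match pvFindRevB i table_data with
    | some v => (some v, some i)
    | none => pvScanB table_data rest

def find_latest_revision_value_and_index_alt (table_data : List (List (String × String))) :
    Option String × Option Int :=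
  let limit := PySem.List.maxD (pvCands table_data) (fun x => x) 0
  let n := pvWalk table_data limit.toNat 0
  pvScanB table_data (PySem.List.pyRange n 0 (-1))

-- ===== PRECONDITION & SPEC =====
def Spec_find_latest_revision_value_and_index (table_data : List (List (String × String))) (out : Option String × Option Int) : Prop := out = find_latest_revision_value_and_index_alt table_data
instance (table_data : List (List (String × String))) (out : Option String × Option Int) : Decidable (Spec_find_latest_revision_value_and_index table_data out) := by unfold Spec_find_latest_revision_value_and_index; infer_instance

-- ===== CLAIM (what is proved, stated in full; the proofs are below) =====
def Claim_equal_find_latest_revision_value_and_index : Prop := ∀ (table_data : List (List (String × String))), Dom_find_latest_revision_value_and_index table_data → Spec_find_latest_revision_value_and_index table_data (find_latest_revision_value_and_index table_data)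

-- ===== LEMMAS AND PROOFS =====

-- ---- the two "has data at index i" tests agree ----

theorem pv_any_or {α : Type} (l : List α) (p q : α → Bool) :
    (l.any fun x => p x || q x) = (l.any p || l.any q) := by
  induction l with
  | nil => simp
  | cons x t ih => simp [List.any_cons, ih]; ac_rfl

theorem pv_has_eq (td : List (List (String × String))) (i : Int) :
    pvHasRevData td i = pvHasData td i := by
  have hcat : ∀ (su s : String), (" " ++ su = s) →
      ∀ x : String, "REV " ++ x ++ " " ++ su = "REV " ++ x ++ s := by
    intro su s h x
    rw [String.append_assoc, h]
  simp only [pvHasRevData, pvHasData, pvSuffixes, pvRevisionFields, List.any_cons, List.any_nil,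
    hcat "REV" " REV" (by decide), hcat "DATE" " DATE" (by decide),
    hcat "DESC" " DESC" (by decide), hcat "DESIGNER" " DESIGNER" (by decide),
    hcat "DRAFTED" " DRAFTED" (by decide), hcat "CHECKED" " CHECKED" (by decide),
    hcat "RPEQ" " RPEQ" (by decide), hcat "RPEQSIGN" " RPEQSIGN" (by decide),
    hcat "COMPANY" " COMPANY" (by decide), Bool.or_false, pv_any_or]

-- ---- find_max_revisions equals the running max over B's candidate list ----

theorem pv_guard_eq (a : String) :
    (PySem.Str.startswith a "REV " && PySem.Str.isIn "REV" a) = PySem.Str.startswith a "REV " := by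
  cases hs : PySem.Str.startswith a "REV " with
  | false => simp
  | true =>
    simp only [Bool.true_and]
    have hp : "REV ".toList <+: a.toList := by
      have := PySem.Str.startswith_eq a "REV "
      rw [hs] at this
      exact (PySem.Chars.startswith_iff a.toList "REV ".toList).mp this.symm
    have hinf : "REV".toList <:+: a.toList :=
      (List.IsPrefix.trans (by decide) hp).isInfix
    rw [PySem.Str.isIn_eq]
    exact (PySem.Chars.isIn_iff_infix "REV".toList a.toList).mpr hinf

-- proof-side names for the two fold bodies (definitionally the fold steps of the ports)
def pvStepA (maxRev : Int) (field : List (String × String)) : Int :=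
  let assignment := (pvGet field "Assignment").getD ""
  if PySem.Str.startswith assignment "REV " && PySem.Str.isIn "REV" assignment then
    match PySem.Int.ofStr?
        ((PySem.List.pyGet? ((PySem.Str.split? assignment " ").getD []) 1).getD "") with
    | some index => max maxRev index
    | none => maxRev
  else maxRev

def pvStepB (cands : List Int) (f : List (String × String)) : List Int :=
  let a := (pvGet f "Assignment").getD ""
  if PySem.Str.startswith a "REV " then
    match PySem.Int.ofStr?
        ((PySem.List.pyGet? ((PySem.Str.split? a " ").getD []) 1).getD "") with
    | some v => cands ++ [v]
    | none => cands
  else cands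

theorem pv_stepB_acc (acc : List Int) (f : List (String × String)) :
    pvStepB acc f = acc ++ pvStepB [] f := by
  rw [pvStepB, pvStepB]
  split
  · split <;> simp
  · simp

theorem pv_foldl_stepB (fs : List (List (String × String))) :
    ∀ acc : List Int, fs.foldl pvStepB acc = acc ++ fs.foldl pvStepB [] := by
  induction fs with
  | nil => intro acc; simp
  | cons f fs ih =>
    intro acc
    rw [List.foldl_cons, List.foldl_cons, ih, ih (pvStepB [] f), pv_stepB_acc acc f,
      List.append_assoc]

theorem pv_stepA_max (m : Int) (f : List (String × String)) :
    pvStepA m f = (pvStepB [] f).foldl max m := by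
  rw [pvStepA, pvStepB]
  rw [pv_guard_eq]
  split
  · split <;> simp
  · simp

theorem pv_findmax_eq_fold (fs : List (List (String × String))) :
    ∀ m : Int, fs.foldl pvStepA m = (fs.foldl pvStepB []).foldl max m := by
  induction fs with
  | nil => intro m; simp
  | cons f fs ih =>
    intro m
    rw [List.foldl_cons, List.foldl_cons, ih, pv_foldl_stepB fs (pvStepB [] f),
      List.foldl_append, pv_stepA_max]

theorem pv_foldl_max_comm (t : List Int) (a : Int) : ∀ b, t.foldl max (max a b) = max a (t.foldl max b) := by
  induction t with
  | nil => intro b; simp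
  | cons x t ih =>
    intro b
    simp only [List.foldl_cons, max_assoc, ih]

theorem pv_findmax_maxD (td : List (List (String × String))) :
    find_max_revisions td = max 0 (PySem.List.maxD (pvCands td) (fun x => x) 0) := by
  have hA : find_max_revisions td = td.foldl pvStepA 0 := rfl
  have hB : pvCands td = td.foldl pvStepB [] := rfl
  rw [hA, pv_findmax_eq_fold, ← hB]
  cases h : pvCands td with
  | nil => simp [PySem.List.maxD, PySem.List.max?]
  | cons c t =>
    rw [PySem.List.maxD, PySem.List.max?_id_cons]
    simp only [Option.getD_some, List.foldl_cons]
    have : max (0 : Int) c = max 0 c := rfl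
    rw [show max (0:Int) c = max 0 c from rfl, pv_foldl_max_comm]

-- ---- the walk ----

theorem pv_walk_ge (td : List (List (String × String))) :
    ∀ (fuel : Nat) (n : Int), n ≤ pvWalk td fuel n := by
  intro fuel
  induction fuel with
  | zero => intro n; simp [pvWalk]
  | succ k ih =>
    intro n
    rw [pvWalk]
    split
    · exact le_trans (by omega) (ih (n + 1))
    · exact le_refl n

-- the ascending update step A performs at each processed index
def pvUpd (td : List (List (String × String)))
    (st : Option String × Option Int) (i : Int) : Option String × Option Int :=
  let rv := pvRevField td i
  if pvTruthy rv then (rv, some i) else st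

-- A's break-loop over range(1, max+1) equals the ascending fold over the walked prefix
theorem pv_loop_eq_walk (td : List (List (String × String))) :
    ∀ (fuel : Nat) (n : Int) (st : Option String × Option Int),
      pvLoopA td (PySem.List.pyRange (n + 1) (n + 1 + fuel) 1) st
        = (PySem.List.pyRange (n + 1) (pvWalk td fuel n + 1) 1).foldl (pvUpd td) st := by
  intro fuel
  induction fuel with
  | zero =>
    intro n st
    simp [PySem.List.pyRange_one_eq_nil (le_refl (n + 1)), pvWalk, pvLoopA]
  | succ k ih =>
    intro n st
    have hlt : n + 1 < n + 1 + ((k : Int) + 1) := by omega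
    rw [show ((↑(k + 1) : Int)) = (k : Int) + 1 by push_cast; ring,
        PySem.List.pyRange_one_cons hlt, pvWalk]
    cases hh : pvHasData td (n + 1) with
    | false =>
      rw [pvLoopA, pv_has_eq, hh]
      simp [PySem.List.pyRange_one_eq_nil (le_refl (n + 1))]
    | true =>
      rw [pvLoopA, pv_has_eq, hh]
      simp only [Bool.not_true, Bool.false_eq_true, reduceIte]
      have hrange : n + 1 + ((k : Int) + 1) = (n + 1) + 1 + (k : Int) := by ring
      have hge : n + 1 ≤ pvWalk td k (n + 1) := pv_walk_ge td k (n + 1)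
      have hcons : PySem.List.pyRange (n + 1) (pvWalk td k (n + 1) + 1) 1
          = (n + 1) :: PySem.List.pyRange (n + 1 + 1) (pvWalk td k (n + 1) + 1) 1 :=
        PySem.List.pyRange_one_cons (by omega)
      rw [hrange, hcons, List.foldl_cons]
      cases ht : pvTruthy (pvRevField td (n + 1)) with
      | false =>
        simp only [Bool.false_eq_true, reduceIte, ih]
        simp [pvUpd, ht]
      | true =>
        simp only [reduceIte, ih]
        simp [pvUpd, ht]

-- pvFindRevB is A's find?-then-bind
theorem pv_findrev_eq (i : Int) :
    ∀ fs : List (List (String × String)), pvFindRevB i fs = pvRevField fs i := by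
  intro fs
  induction fs with
  | nil => simp [pvFindRevB, pvRevField]
  | cons f fs ih =>
    rw [pvFindRevB, pvRevField, List.find?_cons]
    cases ha : (pvGet f "Assignment" == some ("REV " ++ PySem.Int.toStr i ++ " REV")) with
    | false =>
      simp only [Bool.false_and, Bool.false_eq_true, reduceIte]
      exact ih
    | true =>
      cases hv : pvTruthy (pvGet f "Value") with
      | false =>
        simp only [hv, Bool.true_and, Bool.false_eq_true, reduceIte]
        exact ih
      | true => simp [hv]


theorem pv_revfield_truthy (td : List (List (String × String))) (i : Int) :
    pvTruthy (pvRevField td i) = (pvRevField td i).isSome := by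
  rw [pvRevField]
  cases hf : td.find? (fun field =>
      (pvGet field "Assignment" == some ("REV " ++ PySem.Int.toStr i ++ " REV")) &&
      pvTruthy (pvGet field "Value")) with
  | none => simp [pvTruthy]
  | some f =>
    have hv : pvTruthy (pvGet f "Value") = true := by
      have h2 := List.find?_some hf
      simp only [Bool.and_eq_true] at h2
      exact h2.2
    show pvTruthy (pvGet f "Value") = (pvGet f "Value").isSome
    rw [hv]
    cases hg : pvGet f "Value" with
    | none => rw [hg] at hv; simp [pvTruthy] at hv
    | some v => simp

-- the ascending fold over [1..k] equals B's backward scan from k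
theorem pv_asc_eq_back (td : List (List (String × String))) :
    ∀ k : Nat, (PySem.List.pyRange 1 ((k : Int) + 1) 1).foldl (pvUpd td) (none, none)
      = pvScanB td (PySem.List.pyRange (k : Int) 0 (-1)) := by
  intro k
  induction k with
  | zero =>
    simp [PySem.List.pyRange_one_eq_nil (by omega : (1:Int) ≤ 1),
      PySem.List.pyRange_neg_one_eq_nil (le_refl (0 : Int)), pvScanB]
  | succ k ih =>
    have h1 : ((↑(k + 1) : Int)) = (k : Int) + 1 := by push_cast; ring
    rw [h1, PySem.List.pyRange_one_succ_right (by omega : (1:Int) ≤ (k:Int) + 1),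
      List.foldl_append, ih,
      PySem.List.pyRange_neg_one_cons (by omega : (0:Int) < (k:Int) + 1), pvScanB]
    rw [pv_findrev_eq]
    have ht := pv_revfield_truthy td ((k : Int) + 1)
    cases hr : pvRevField td ((k : Int) + 1) with
    | some v =>
      rw [hr] at ht
      simp only [List.foldl_cons, List.foldl_nil, pvUpd, hr, ht, Option.isSome_some, reduceIte]
    | none =>
      rw [hr] at ht
      simp only [List.foldl_cons, List.foldl_nil, pvUpd, hr, ht, Option.isSome_none,
        Bool.false_eq_true, reduceIte]
      rw [show ((k : Int) + 1 - 1) = (k : Int) by ring]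

-- ===== VERDICT (by name: the statement is the Claim_ definition above) =====
theorem find_latest_revision_value_and_index_spec : Claim_equal_find_latest_revision_value_and_index := by
  intro td _
  show find_latest_revision_value_and_index td = find_latest_revision_value_and_index_alt td
  rw [find_latest_revision_value_and_index, find_latest_revision_value_and_index_alt]
  have hM := pv_findmax_maxD td
  set L : Int := PySem.List.maxD (pvCands td) (fun x => x) 0 with hL
  have hM0 : 0 ≤ find_max_revisions td := by rw [hM]; omega
  have hfuel : (find_max_revisions td).toNat = L.toNat := by omega
  have hloop := pv_loop_eq_walk td (find_max_revisions td).toNat 0 (none, none)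
  rw [show (0 : Int) + 1 = 1 by ring] at hloop
  rw [show find_max_revisions td + 1 = 1 + ((find_max_revisions td).toNat : Int) by omega,
    hloop, hfuel]
  have hn0 : (0 : Int) ≤ pvWalk td L.toNat 0 := pv_walk_ge td L.toNat 0
  rw [show pvWalk td L.toNat 0 = (((pvWalk td L.toNat 0).toNat : Nat) : Int) by omega]
  exact pv_asc_eq_back td (pvWalk td L.toNat 0).toNat
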